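-- pv_equiv track=rewrite | github.com/shamshad-npti/codegoda | 2023/3-100-under-40/solution.py | maximum_reachable_node
-- ===== SOURCE A (Python) =====
-- def strongly_connected_components(graph):
--     N = len(graph)
--     rev_graph = [[] for _ in range(N)]
--     for u in range(N):
--         for v in graph[u]:
--             rev_graph[v].append(u)
--
--     stack, components = [], []
--
--     def dfs(u, visited):
--         visited[u] = True
--         for v in graph[u]:
--             if not visited[v]:
--                 dfs(v, visited)
--         stack.append(u)
--
--     def dfs_rev(u, visited, component):
--         visited[u] = True
--         for v in rev_graph[u]:
--             if not visited[v]: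
--                 dfs_rev(v, visited, component)
--         component.append(u)
--
--     visited = [False] * N
--     for u in range(N):
--         if not visited[u]:
--             dfs(u, visited)
--
--     visited = [False] * N
--     for u in stack[::-1]:
--         if not visited[u]:
--             component = []
--             dfs_rev(u, visited, component)
--             components.append(component)
--     return components
--
-- def maximum_reachable_node(graph):
--     scc = strongly_connected_components(graph)
--     N = len(graph)
--     comp_mappping = [0] * N
--     for i, comp in enumerate(scc):
--         for u in comp:
--             comp_mappping[u] = i
--
--     induced_graph = [[] for _ in range(len(scc))]
--     for u in range(N):
--         for v in graph[u]:
--             if comp_mappping[u] != comp_mappping[v]: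
--                 induced_graph[comp_mappping[u]].append(comp_mappping[v])
--
--     for i in range(len(scc)):
--         induced_graph[i] = list(set(induced_graph[i]))
--
--     visited = [False] * len(scc)
--     best_path_size = [0] * len(scc)
--
--     def dfs(u):
--         visited[u] = True
--         best = 0
--         for v in induced_graph[u]:
--             if not visited[v]:
--                 best = max(best, dfs(v))
--             else:
--                 best = max(best, best_path_size[v])
--         best_path_size[u] = best+len(scc[u])
--         return best_path_size[u]
--
--     for u in range(len(scc)):
--         if not visited[u]:
--             dfs(u)
--
--     result = [0] * N
--     for u in range(N):
--         result[u] = best_path_size[comp_mappping[u]]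
--     return result
-- ===== SOURCE B (Python) =====
-- def _dfs_iter(g, s, visited, out):
--     """Post-order DFS from s using an explicit frame stack instead of recursion.
--     Appends finished nodes to out in the same order the recursive DFS would."""
--     visited[s] = True
--     stack = [(s, 0)]
--     while stack:
--         u, i = stack.pop()
--         if i < len(g[u]):
--             stack.append((u, i + 1))
--             v = g[u][i]
--             if not visited[v]:
--                 visited[v] = True
--                 stack.append((v, 0))
--         else:
--             out.append(u)
--
--
-- def maximum_reachable_node(graph):
--     N = len(graph)
--     rev_graph = [[] for _ in range(N)]
--     for u in range(N):
--         for v in graph[u]: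
--             rev_graph[v].append(u)
--
--     # Kosaraju phase 1: finish order (iterative)
--     visited = [False] * N
--     order = []
--     for u in range(N):
--         if not visited[u]:
--             _dfs_iter(graph, u, visited, order)
--
--     # Kosaraju phase 2: components from reverse graph (iterative)
--     visited = [False] * N
--     scc = []
--     for u in order[::-1]:
--         if not visited[u]:
--             component = []
--             _dfs_iter(rev_graph, u, visited, component)
--             scc.append(component)
--
--     comp_mappping = [0] * N
--     for i, comp in enumerate(scc):
--         for u in comp:
--             comp_mappping[u] = i
--
--     induced_graph = [[] for _ in range(len(scc))]
--     for u in range(N):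
--         for v in graph[u]:
--             if comp_mappping[u] != comp_mappping[v]:
--                 induced_graph[comp_mappping[u]].append(comp_mappping[v])
--
--     for i in range(len(scc)):
--         induced_graph[i] = list(set(induced_graph[i]))
--
--     # memoised longest weighted path on the condensation, explicit stack
--     visited = [False] * len(scc)
--     best_path_size = [0] * len(scc)
--     for s in range(len(scc)):
--         if visited[s]:
--             continue
--         visited[s] = True
--         stack = [(s, 0, 0)]
--         while stack:
--             u, i, best = stack.pop()
--             if i < len(induced_graph[u]):
--                 v = induced_graph[u][i]
--                 if not visited[v]:
--                     visited[v] = True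
--                     stack.append((u, i + 1, best))
--                     stack.append((v, 0, 0))
--                 else:
--                     stack.append((u, i + 1, max(best, best_path_size[v])))
--             else:
--                 best_path_size[u] = best + len(scc[u])
--                 if stack:
--                     pu, pi, pbest = stack.pop()
--                     stack.append((pu, pi, max(pbest, best_path_size[u])))
--
--     return [best_path_size[comp_mappping[u]] for u in range(N)]
-- ===== Notes on version B (the rewrite author's own statement) =====
-- stated objective: alternative
-- what changed: A's three recursive depth-first traversals (Kosaraju's forward finish-order pass, the reverse-graph component pass, and the memoised longest-weighted-path DP on the condensation) are replaced by fully iterative versions driven by explicit frame stacks of (node, child-index[, running-best]) tuples, so B performs no recursion at all (and hence cannot hit Python's recursion limit); the condensation construction and per-component bookkeeping are unchanged.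
import Mathlib
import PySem

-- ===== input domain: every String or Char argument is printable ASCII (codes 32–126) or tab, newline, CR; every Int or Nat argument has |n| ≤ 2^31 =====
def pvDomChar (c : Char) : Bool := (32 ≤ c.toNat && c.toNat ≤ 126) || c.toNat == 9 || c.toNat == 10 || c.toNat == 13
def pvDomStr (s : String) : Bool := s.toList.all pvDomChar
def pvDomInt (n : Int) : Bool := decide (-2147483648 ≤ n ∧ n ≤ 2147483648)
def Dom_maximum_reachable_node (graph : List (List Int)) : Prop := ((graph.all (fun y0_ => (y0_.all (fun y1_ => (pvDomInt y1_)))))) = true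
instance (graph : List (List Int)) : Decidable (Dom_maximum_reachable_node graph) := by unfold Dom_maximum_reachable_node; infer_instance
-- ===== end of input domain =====

-- B re-implements A's three recursive depth-first traversals (the two Kosaraju passes and the
-- memoised longest-path DP on the condensation) as explicit-stack iterations; same return value.

-- ===== PORT A =====
mutual
def dfsA (g : List (List Int)) : Nat → Int → List Bool → List Bool × List Int
  | 0, _, vis => (vis, [])
  | fuel + 1, u, vis =>
      let vis' := PySem.List.pySetD vis u true
      let r := dfsAList g fuel (PySem.List.pyGetD g u []) vis'
      (r.1, r.2 ++ [u])
  termination_by fuel _ _ => (fuel, 0)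
def dfsAList (g : List (List Int)) : Nat → List Int → List Bool → List Bool × List Int
  | _, [], vis => (vis, [])
  | fuel, v :: rest, vis =>
      if PySem.List.pyGetD vis v true then dfsAList g fuel rest vis
      else
        let r := dfsA g fuel v vis
        let r2 := dfsAList g fuel rest r.1
        (r2.1, r.2 ++ r2.2)
  termination_by fuel vs _ => (fuel, vs.length + 1)
end

def pvRevGraph (graph : List (List Int)) : List (List Int) :=
  (PySem.List.pyRange 0 graph.length 1).foldl
    (fun rg u => (PySem.List.pyGetD graph u []).foldl
        (fun rg v => PySem.List.pySetD rg v (PySem.List.pyGetD rg v [] ++ [u])) rg)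
    (List.replicate graph.length [])

def pvSCC_A (graph : List (List Int)) : List (List Int) :=
  let N := graph.length
  let rev := pvRevGraph graph
  let p1 := (PySem.List.pyRange 0 (N : Int) 1).foldl
      (fun (st : List Bool × List Int) u =>
        if PySem.List.pyGetD st.1 u true then st
        else let r := dfsA graph N u st.1; (r.1, st.2 ++ r.2))
      (List.replicate N false, [])
  (((PySem.List.slice? p1.2 none none (-1)).getD []).foldl
      (fun (st : List Bool × List (List Int)) u =>
        if PySem.List.pyGetD st.1 u true then st
        else let r := dfsA rev N u st.1; (r.1, st.2 ++ [r.2]))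
      (List.replicate N false, [])).2

def pvCompMap (N : Nat) (scc : List (List Int)) : List Int :=
  (PySem.List.enumerate scc).foldl
    (fun cm p => p.2.foldl (fun cm u => PySem.List.pySetD cm u p.1) cm)
    (List.replicate N 0)

def pvInduced (graph : List (List Int)) (cm : List Int) (C : Nat) : List (List Int) :=
  let ind := (PySem.List.pyRange 0 (graph.length : Int) 1).foldl
      (fun ind u => (PySem.List.pyGetD graph u []).foldl
          (fun ind v =>
            if PySem.List.pyGetD cm u 0 ≠ PySem.List.pyGetD cm v 0 then
              PySem.List.pySetD ind (PySem.List.pyGetD cm u 0)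
                (PySem.List.pyGetD ind (PySem.List.pyGetD cm u 0) [] ++ [PySem.List.pyGetD cm v 0])
            else ind) ind)
      (List.replicate C ([] : List Int))
  (PySem.List.pyRange 0 (C : Int) 1).foldl
    (fun ind i => PySem.List.pySetD ind i (PySem.Set.ofList (PySem.List.pyGetD ind i []))) ind

mutual
def dpA (ind scc : List (List Int)) : Nat → Int → List Bool × List Int → (List Bool × List Int) × Int
  | 0, _, st => (st, 0)
  | fuel + 1, u, st =>
      let vis' := PySem.List.pySetD st.1 u true
      let r := dpAList ind scc fuel (PySem.List.pyGetD ind u []) (vis', st.2) 0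
      let val := r.2 + ((PySem.List.pyGetD scc u []).length : Int)
      let bps := PySem.List.pySetD r.1.2 u val
      ((r.1.1, bps), PySem.List.pyGetD bps u 0)
  termination_by fuel _ _ => (fuel, 0)
def dpAList (ind scc : List (List Int)) : Nat → List Int → List Bool × List Int → Int → (List Bool × List Int) × Int
  | _, [], st, best => (st, best)
  | fuel, v :: rest, st, best =>
      if PySem.List.pyGetD st.1 v true then
        dpAList ind scc fuel rest st (max best (PySem.List.pyGetD st.2 v 0))
      else
        let r := dpA ind scc fuel v st
        dpAList ind scc fuel rest r.1 (max best r.2)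
  termination_by fuel vs _ _ => (fuel, vs.length + 1)
end

def maximum_reachable_node (graph : List (List Int)) : List Int :=
  let scc := pvSCC_A graph
  let N := graph.length
  let cm := pvCompMap N scc
  let C := scc.length
  let ind := pvInduced graph cm C
  let dp := (PySem.List.pyRange 0 (C : Int) 1).foldl
      (fun (st : List Bool × List Int) u =>
        if PySem.List.pyGetD st.1 u true then st else (dpA ind scc C u st).1)
      (List.replicate C false, List.replicate C (0 : Int))
  (PySem.List.pyRange 0 (N : Int) 1).foldl
    (fun res u => PySem.List.pySetD res u (PySem.List.pyGetD dp.2 (PySem.List.pyGetD cm u 0) 0))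
    (List.replicate N (0 : Int))

-- ===== PORT B =====
theorem pvIdxLt {n : Nat} {i : Int} {j : Nat} (h : PySem.List.pyIdx? n i = some j) : j < n := by
  unfold PySem.List.pyIdx? at h
  split_ifs at h with h1 h2 h3 <;>
    (try obtain rfl := Option.some.inj h) <;> omega

theorem pvGetFalse {vis : List Bool} {v : Int} (h : PySem.List.pyGetD vis v true = false) :
    ∃ j : Nat, ∃ hj : j < vis.length, vis[j] = false ∧
      PySem.List.pySetD vis v true = vis.set j true := by
  have hb : PySem.List.pyGet? vis v = some false := by
    unfold PySem.List.pyGetD at h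
    cases h' : PySem.List.pyGet? vis v with
    | none => rw [h'] at h; simp at h
    | some b => rw [h'] at h; simp at h; rw [h]
  unfold PySem.List.pyGet? at hb
  cases hix : PySem.List.pyIdx? vis.length v with
  | none => rw [hix] at hb; simp at hb
  | some j =>
    rw [hix] at hb
    simp only [Option.bind] at hb
    have hj : j < vis.length := pvIdxLt hix
    refine ⟨j, hj, ?_, ?_⟩
    · rw [List.getElem?_eq_getElem hj] at hb; exact Option.some.inj hb
    · unfold PySem.List.pySetD PySem.List.pySet?; rw [hix]; rfl

theorem pvListCountSetLt {l : List Bool} {j : Nat} (hj : j < l.length) (hf : l[j] = false) :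
    (l.set j true).count false < l.count false := by
  have h1 : l.count false = (l.take j).count false + (l[j] :: l.drop (j+1)).count false := by
    rw [List.getElem_cons_drop, ← List.count_append, List.take_append_drop]
  rw [List.set_eq_take_append_cons_drop, if_pos hj, h1]
  simp [List.count_append, hf]

-- `visited[v]` read false ⟹ marking `visited[v] = True` removes one unvisited node.
-- (These four lemmas are cited by `decreasing_by` of the machines below, so they stay above them.)
theorem pvCountSetLt {vis : List Bool} {v : Int} (h : PySem.List.pyGetD vis v true = false) :
    (PySem.List.pySetD vis v true).count false < vis.count false := by
  obtain ⟨j, hj, hf, hset⟩ := pvGetFalse h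
  rw [hset]
  exact pvListCountSetLt hj hf

def dfsMachine (g : List (List Int)) : List (Int × Int) → List Bool → List Int → List Bool × List Int
  | [], vis, out => (vis, out)
  | (u, i) :: stk, vis, out =>
      let row := PySem.List.pyGetD g u []
      if i < (row.length : Int) then
        let v := PySem.List.pyGetD row i 0
        if PySem.List.pyGetD vis v true then
          dfsMachine g ((u, i + 1) :: stk) vis out
        else
          dfsMachine g ((v, 0) :: (u, i + 1) :: stk) (PySem.List.pySetD vis v true) out
      else
        dfsMachine g stk vis (out ++ [u])
termination_by frames vis _ =>
  (vis.count false,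
    (frames.map (fun f => (((PySem.List.pyGetD g f.1 []).length : Int) + 1 - f.2).toNat)).sum + frames.length)
decreasing_by
  all_goals simp_wf
  · rename_i hlt _
    refine Prod.Lex.right _ ?_
    have hlt' : i < ((PySem.List.pyGetD g u []).length : Int) := hlt
    omega
  · rename_i hlt hvis
    exact Prod.Lex.left _ _ (pvCountSetLt (by simpa using hvis))
  · rename_i hge
    refine Prod.Lex.right _ ?_
    have hge' : ¬ i < ((PySem.List.pyGetD g u []).length : Int) := hge
    omega

def pvDfsIter (g : List (List Int)) (s : Int) (vis : List Bool) (out : List Int) :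
    List Bool × List Int :=
  dfsMachine g [(s, 0)] (PySem.List.pySetD vis s true) out

def dpMachine (ind scc : List (List Int)) :
    List (Int × Int × Int) → List Bool × List Int → List Bool × List Int
  | [], st => st
  | (u, i, best) :: stk, st =>
      let row := PySem.List.pyGetD ind u []
      if i < (row.length : Int) then
        let v := PySem.List.pyGetD row i 0
        if PySem.List.pyGetD st.1 v true then
          dpMachine ind scc ((u, i + 1, max best (PySem.List.pyGetD st.2 v 0)) :: stk) st
        else
          dpMachine ind scc ((v, 0, 0) :: (u, i + 1, best) :: stk)
            (PySem.List.pySetD st.1 v true, st.2)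
      else
        let val := best + ((PySem.List.pyGetD scc u []).length : Int)
        let bps := PySem.List.pySetD st.2 u val
        match stk with
        | [] => (st.1, bps)
        | (pu, pi, pb) :: rest =>
            dpMachine ind scc ((pu, pi, max pb (PySem.List.pyGetD bps u 0)) :: rest) (st.1, bps)
termination_by frames st =>
  (st.1.count false,
    (frames.map (fun f => (((PySem.List.pyGetD ind f.1 []).length : Int) + 1 - f.2.1).toNat)).sum
      + frames.length)
decreasing_by
  all_goals simp_wf
  · rename_i hlt _
    refine Prod.Lex.right _ ?_
    have hlt' : i < ((PySem.List.pyGetD ind u []).length : Int) := hlt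
    omega
  · rename_i hlt hvis
    exact Prod.Lex.left _ _ (pvCountSetLt (by simpa using hvis))
  · rename_i hge
    refine Prod.Lex.right _ ?_
    have hge' : ¬ i < ((PySem.List.pyGetD ind u []).length : Int) := hge
    omega

def maximum_reachable_node_alt (graph : List (List Int)) : List Int :=
  let N := graph.length
  let rev := pvRevGraph graph
  let p1 := (PySem.List.pyRange 0 (N : Int) 1).foldl
      (fun (st : List Bool × List Int) u =>
        if PySem.List.pyGetD st.1 u true then st
        else pvDfsIter graph u st.1 st.2)
      (List.replicate N false, [])
  let scc := (((PySem.List.slice? p1.2 none none (-1)).getD []).foldl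
      (fun (st : List Bool × List (List Int)) u =>
        if PySem.List.pyGetD st.1 u true then st
        else
          let r := pvDfsIter rev u st.1 []
          (r.1, st.2 ++ [r.2]))
      (List.replicate N false, [])).2
  let cm := pvCompMap N scc
  let C := scc.length
  let ind := pvInduced graph cm C
  let dp := (PySem.List.pyRange 0 (C : Int) 1).foldl
      (fun (st : List Bool × List Int) u =>
        if PySem.List.pyGetD st.1 u true then st
        else dpMachine ind scc [(u, 0, 0)] (PySem.List.pySetD st.1 u true, st.2))
      (List.replicate C false, List.replicate C (0 : Int))
  (PySem.List.pyRange 0 (N : Int) 1).map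
    (fun u => PySem.List.pyGetD dp.2 (PySem.List.pyGetD cm u 0) 0)

-- ===== PRECONDITION & SPEC =====
-- Pre_: every listed neighbour is a valid Python index into the graph (|v| within range, so
-- `rev_graph[v]` / `visited[v]` never raise IndexError); exactly the inputs where Python A returns.
def Pre_maximum_reachable_node (graph : List (List Int)) : Prop :=
  ∀ row ∈ graph, ∀ v ∈ row, -(graph.length : Int) ≤ v ∧ v < (graph.length : Int)
instance (graph : List (List Int)) : Decidable (Pre_maximum_reachable_node graph) := by
  unfold Pre_maximum_reachable_node; infer_instance
def pvWitness_maximum_reachable_node : List (List Int) := [[1], [0]]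
def Spec_maximum_reachable_node (graph : List (List Int)) (out : List Int) : Prop :=
  out = maximum_reachable_node_alt graph
instance (graph : List (List Int)) (out : List Int) :
    Decidable (Spec_maximum_reachable_node graph out) := by
  unfold Spec_maximum_reachable_node; infer_instance

-- ===== CLAIM (what is proved, stated in full; the proofs are below) =====
def Claim_equal_maximum_reachable_node : Prop := ∀ (graph : List (List Int)), Dom_maximum_reachable_node graph → Pre_maximum_reachable_node graph → Spec_maximum_reachable_node graph (maximum_reachable_node graph)

-- ===== LEMMAS AND PROOFS =====
-- (The two ports in fact agree on every input, Pre_ or not: the Lean ports read/write list cells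
-- with the same total pyGetD/pySetD primitives, so the proofs below never need Pre_; Pre_ marks
-- where the Python A itself returns instead of raising, which is what the claim is about.)
theorem pvListCountSetLe (l : List Bool) (j : Nat) :
    (l.set j true).count false ≤ l.count false := by
  by_cases hj : j < l.length
  · have h1 : l.count false = (l.take j).count false + (l[j] :: l.drop (j+1)).count false := by
      rw [List.getElem_cons_drop, ← List.count_append, List.take_append_drop]
    rw [List.set_eq_take_append_cons_drop, if_pos hj, h1]
    simp only [List.count_append, List.count_cons]
    cases h : l[j] <;> simp
  · rw [List.set_eq_take_append_cons_drop, if_neg hj]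

theorem pvCountSetLe (vis : List Bool) (v : Int) :
    (PySem.List.pySetD vis v true).count false ≤ vis.count false := by
  unfold PySem.List.pySetD PySem.List.pySet?
  cases hix : PySem.List.pyIdx? vis.length v with
  | none => simp
  | some j => simpa using pvListCountSetLe vis j

theorem pvCountPos {vis : List Bool} {v : Int} (h : PySem.List.pyGetD vis v true = false) :
    0 < vis.count false := by
  obtain ⟨j, hj, hf, -⟩ := pvGetFalse h
  exact List.count_pos_iff.mpr (hf ▸ List.getElem_mem hj)

-- ===== length / count lemmas for the recursive DFS =====
theorem pvDfsALen (g : List (List Int)) : ∀ fuel : Nat,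
    (∀ u vis, (dfsA g fuel u vis).1.length = vis.length) ∧
    (∀ vs vis, (dfsAList g fuel vs vis).1.length = vis.length) := by
  intro fuel
  induction fuel with
  | zero =>
    constructor
    · intro u vis; simp [dfsA]
    · intro vs
      induction vs with
      | nil => intro vis; simp [dfsAList]
      | cons v rest ihl =>
        intro vis
        by_cases h : PySem.List.pyGetD vis v true = true
        · simp [dfsAList, h, ihl]
        · simp [dfsAList, h, dfsA, ihl]
  | succ fuel ih =>
    have hdfs : ∀ u vis, (dfsA g (fuel+1) u vis).1.length = vis.length := by
      intro u vis
      simp [dfsA, ih.2, PySem.List.length_pySetD]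
    refine ⟨hdfs, ?_⟩
    intro vs
    induction vs with
    | nil => intro vis; simp [dfsAList]
    | cons v rest ihl =>
      intro vis
      by_cases h : PySem.List.pyGetD vis v true = true
      · simp [dfsAList, h, ihl]
      · simp [dfsAList, h, ihl, hdfs]

theorem pvDfsAMono (g : List (List Int)) : ∀ fuel : Nat,
    (∀ u vis, (dfsA g fuel u vis).1.count false ≤ vis.count false) ∧
    (∀ vs vis, (dfsAList g fuel vs vis).1.count false ≤ vis.count false) := by
  intro fuel
  induction fuel with
  | zero =>
    constructor
    · intro u vis; simp [dfsA]
    · intro vs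
      induction vs with
      | nil => intro vis; simp [dfsAList]
      | cons v rest ihl =>
        intro vis
        by_cases h : PySem.List.pyGetD vis v true = true
        · simp [dfsAList, h]; exact ihl vis
        · simp [dfsAList, h, dfsA]; exact ihl vis
  | succ fuel ih =>
    have hdfs : ∀ u vis, (dfsA g (fuel+1) u vis).1.count false ≤ vis.count false := by
      intro u vis
      simp only [dfsA]
      exact le_trans (ih.2 _ _) (pvCountSetLe vis u)
    refine ⟨hdfs, ?_⟩
    intro vs
    induction vs with
    | nil => intro vis; simp [dfsAList]
    | cons v rest ihl =>
      intro vis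
      by_cases h : PySem.List.pyGetD vis v true = true
      · simp [dfsAList, h]; exact ihl vis
      · simp only [dfsAList, h, Bool.false_eq_true, if_false]
        exact le_trans (ihl _) (hdfs v vis)

theorem pvDfsAIrrel (g : List (List Int)) : ∀ f1 f2 : Nat,
    (∀ u vis, vis.count false ≤ f1 → vis.count false ≤ f2 →
        PySem.List.pyGetD vis u true = false → dfsA g f1 u vis = dfsA g f2 u vis) ∧
    (∀ vs vis, vis.count false ≤ f1 → vis.count false ≤ f2 →
        dfsAList g f1 vs vis = dfsAList g f2 vs vis) := by
  intro f1
  induction f1 using Nat.strong_induction_on with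
  | _ f1 ih =>
    intro f2
    have hdfs : ∀ u vis, vis.count false ≤ f1 → vis.count false ≤ f2 →
        PySem.List.pyGetD vis u true = false → dfsA g f1 u vis = dfsA g f2 u vis := by
      intro u vis h1 h2 hu
      have hpos : 0 < vis.count false := pvCountPos hu
      obtain ⟨k1, rfl⟩ : ∃ k, f1 = k + 1 := ⟨f1 - 1, by omega⟩
      obtain ⟨k2, rfl⟩ : ∃ k, f2 = k + 1 := ⟨f2 - 1, by omega⟩
      have hlt := pvCountSetLt hu
      simp only [dfsA]
      rw [(ih k1 (by omega) k2).2 _ _ (by omega) (by omega)]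
    refine ⟨hdfs, ?_⟩
    intro vs
    induction vs with
    | nil => intro vis h1 h2; simp [dfsAList]
    | cons v rest ihl =>
      intro vis h1 h2
      by_cases hv : PySem.List.pyGetD vis v true = true
      · simp only [dfsAList, hv, if_true]
        exact ihl vis h1 h2
      · have hvf : PySem.List.pyGetD vis v true = false := by simpa using hv
        simp only [dfsAList, hvf, Bool.false_eq_true, if_false]
        rw [hdfs v vis h1 h2 hvf,
          ihl _ (le_trans ((pvDfsAMono g f2).1 v vis) h1)
            (le_trans ((pvDfsAMono g f2).1 v vis) h2)]

-- ===== simulation: explicit-stack DFS = recursive DFS =====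
def unwindA (g : List (List Int)) (F : Nat) : List (Int × Int) → List Bool → List Bool × List Int
  | [], vis => (vis, [])
  | (u, i) :: stk, vis =>
      let r := dfsAList g F ((PySem.List.pyGetD g u []).drop i.toNat) vis
      let r2 := unwindA g F stk r.1
      (r2.1, r.2 ++ [u] ++ r2.2)

theorem pvSim1 (g : List (List Int)) (F : Nat) :
    ∀ frames vis out,
      (∀ f ∈ frames, 0 ≤ f.2) → vis.count false ≤ F →
      dfsMachine g frames vis out =
        ((unwindA g F frames vis).1, out ++ (unwindA g F frames vis).2) := by
  intro frames vis out
  fun_induction dfsMachine g frames vis out with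
  | case1 vis out => intro _ _; simp [unwindA]
  | case2 u i stk vis out row hlt v hvis ih =>
    intro hf hc
    have h0 : 0 ≤ i := hf (u, i) (by simp)
    have hlt' : i < ((PySem.List.pyGetD g u []).length : Int) := hlt
    have hvis' : PySem.List.pyGetD vis (PySem.List.pyGetD (PySem.List.pyGetD g u []) i 0) true
        = true := hvis
    have hiN : i.toNat < (PySem.List.pyGetD g u []).length := by omega
    have hdrop : (PySem.List.pyGetD g u []).drop i.toNat
        = PySem.List.pyGetD (PySem.List.pyGetD g u []) i 0
            :: (PySem.List.pyGetD g u []).drop (i+1).toNat := by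
      rw [List.drop_eq_getElem_cons hiN]
      congr 1
      · exact (PySem.List.pyGetD_eq_getElem _ _ h0 hlt').symm
      · congr 1; omega
    rw [ih (by
        intro f hfm
        rcases List.mem_cons.mp hfm with h | h
        · subst h; simpa using by omega
        · exact hf f (List.mem_cons_of_mem _ h)) hc]
    simp only [unwindA]
    rw [hdrop]
    simp only [dfsAList, hvis', if_true]
  | case3 u i stk vis out row hlt v hvis ih =>
    intro hf hc
    have h0 : 0 ≤ i := hf (u, i) (by simp)
    have hlt' : i < ((PySem.List.pyGetD g u []).length : Int) := hlt
    have hvf : PySem.List.pyGetD vis (PySem.List.pyGetD (PySem.List.pyGetD g u []) i 0) true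
        = false := by simpa using hvis
    have hiN : i.toNat < (PySem.List.pyGetD g u []).length := by omega
    have hdrop : (PySem.List.pyGetD g u []).drop i.toNat
        = PySem.List.pyGetD (PySem.List.pyGetD g u []) i 0
            :: (PySem.List.pyGetD g u []).drop (i+1).toNat := by
      rw [List.drop_eq_getElem_cons hiN]
      congr 1
      · exact (PySem.List.pyGetD_eq_getElem _ _ h0 hlt').symm
      · congr 1; omega
    have hcpos := pvCountPos hvf
    have hset := pvCountSetLt hvf
    rw [ih (by
        intro f hfm
        rcases List.mem_cons.mp hfm with h | h
        · subst h; simp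
        · rcases List.mem_cons.mp h with h' | h'
          · subst h'; simpa using by omega
          · exact hf f (List.mem_cons_of_mem _ h')) (le_trans (le_of_lt hset) hc)]
    obtain ⟨F', rfl⟩ : ∃ k, F = k + 1 := ⟨F - 1, by omega⟩
    simp only [unwindA]
    rw [hdrop]
    simp only [dfsAList, hvf, Bool.false_eq_true, if_false, dfsA]
    rw [(pvDfsAIrrel g F' (F'+1)).2 _ _ (by omega) (by omega)]
    simp only [List.append_assoc, Int.toNat_zero, List.drop_zero, List.cons_append,
      Prod.mk.injEq]
    constructor <;> rfl
  | case4 u i stk vis out row hge ih =>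
    intro hf hc
    have h0 : 0 ≤ i := hf (u, i) (by simp)
    have hge' : ¬ i < ((PySem.List.pyGetD g u []).length : Int) := hge
    have hdrop : (PySem.List.pyGetD g u []).drop i.toNat = [] :=
      List.drop_eq_nil_of_le (by omega)
    rw [ih (by intro f hfm; exact hf f (List.mem_cons_of_mem _ hfm)) hc]
    simp only [unwindA]
    rw [hdrop]
    simp [dfsAList, List.append_assoc]

-- ===== body / fold lemmas for the two Kosaraju phases =====
theorem pvBody1 (g : List (List Int)) (N : Nat) {vis : List Bool} {u : Int} (out : List Int)
    (hlen : vis.length = N) (hu : PySem.List.pyGetD vis u true = false) :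
    pvDfsIter g u vis out = ((dfsA g N u vis).1, out ++ (dfsA g N u vis).2) := by
  have hpos := pvCountPos hu
  have hle : vis.count false ≤ N := hlen ▸ List.count_le_length
  obtain ⟨N', rfl⟩ : ∃ k, N = k + 1 := ⟨N - 1, by omega⟩
  unfold pvDfsIter
  rw [pvSim1 g N' [(u, 0)] _ out (by simp) (by have := pvCountSetLt hu; omega)]
  simp only [unwindA, dfsA, Int.toNat_zero, List.drop_zero]
  simp

theorem pvFold1 (g : List (List Int)) (N : Nat) (l : List Int) :
    ∀ (vis : List Bool) (out : List Int), vis.length = N →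
      l.foldl (fun (st : List Bool × List Int) u =>
          if PySem.List.pyGetD st.1 u true then st
          else let r := dfsA g N u st.1; (r.1, st.2 ++ r.2)) (vis, out)
      = l.foldl (fun (st : List Bool × List Int) u =>
          if PySem.List.pyGetD st.1 u true then st
          else pvDfsIter g u st.1 st.2) (vis, out) := by
  intro vis out hlen
  induction l generalizing vis out with
  | nil => rfl
  | cons x xs ih =>
    simp only [List.foldl_cons]
    by_cases hx : PySem.List.pyGetD vis x true = true
    · simp only [hx, if_true]; exact ih vis out hlen
    · have hxf : PySem.List.pyGetD vis x true = false := by simpa using hx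
      simp only [hxf, Bool.false_eq_true, if_false]
      rw [pvBody1 g N out hlen hxf]
      exact ih _ _ (by rw [(pvDfsALen g N).1]; exact hlen)

theorem pvFold2 (g : List (List Int)) (N : Nat) (l : List Int) :
    ∀ (vis : List Bool) (acc : List (List Int)), vis.length = N →
      l.foldl (fun (st : List Bool × List (List Int)) u =>
          if PySem.List.pyGetD st.1 u true then st
          else let r := dfsA g N u st.1; (r.1, st.2 ++ [r.2])) (vis, acc)
      = l.foldl (fun (st : List Bool × List (List Int)) u =>
          if PySem.List.pyGetD st.1 u true then st
          else let r := pvDfsIter g u st.1 []; (r.1, st.2 ++ [r.2])) (vis, acc) := by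
  intro vis acc hlen
  induction l generalizing vis acc with
  | nil => rfl
  | cons x xs ih =>
    simp only [List.foldl_cons]
    by_cases hx : PySem.List.pyGetD vis x true = true
    · simp only [hx, if_true]; exact ih vis acc hlen
    · have hxf : PySem.List.pyGetD vis x true = false := by simpa using hx
      simp only [hxf, Bool.false_eq_true, if_false]
      rw [pvBody1 g N [] hlen hxf]
      simp only [List.nil_append]
      exact ih _ _ (by rw [(pvDfsALen g N).1]; exact hlen)

-- ===== length / count / fuel lemmas for the recursive DP =====
theorem pvDpALen (ind scc : List (List Int)) : ∀ fuel : Nat,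
    (∀ u st, ((dpA ind scc fuel u st).1.1.length = st.1.length)) ∧
    (∀ vs st best, ((dpAList ind scc fuel vs st best).1.1.length = st.1.length)) := by
  intro fuel
  induction fuel with
  | zero =>
    constructor
    · intro u st; simp [dpA]
    · intro vs
      induction vs with
      | nil => intro st best; simp [dpAList]
      | cons v rest ihl =>
        intro st best
        by_cases h : PySem.List.pyGetD st.1 v true = true
        · simp [dpAList, h, ihl]
        · simp [dpAList, h, dpA, ihl]
  | succ fuel ih =>
    have hdfs : ∀ u st, ((dpA ind scc (fuel+1) u st).1.1.length = st.1.length) := by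
      intro u st
      simp [dpA, ih.2, PySem.List.length_pySetD]
    refine ⟨hdfs, ?_⟩
    intro vs
    induction vs with
    | nil => intro st best; simp [dpAList]
    | cons v rest ihl =>
      intro st best
      by_cases h : PySem.List.pyGetD st.1 v true = true
      · simp [dpAList, h, ihl]
      · simp [dpAList, h, ihl, hdfs]

theorem pvDpAMono (ind scc : List (List Int)) : ∀ fuel : Nat,
    (∀ u st, ((dpA ind scc fuel u st).1.1.count false ≤ st.1.count false)) ∧
    (∀ vs st best, ((dpAList ind scc fuel vs st best).1.1.count false ≤ st.1.count false)) := by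
  intro fuel
  induction fuel with
  | zero =>
    constructor
    · intro u st; simp [dpA]
    · intro vs
      induction vs with
      | nil => intro st best; simp [dpAList]
      | cons v rest ihl =>
        intro st best
        by_cases h : PySem.List.pyGetD st.1 v true = true
        · simp only [dpAList, h, if_true]; exact ihl st _
        · simp only [dpAList, h, Bool.false_eq_true, if_false, dpA]; exact ihl _ _
  | succ fuel ih =>
    have hdfs : ∀ u st, ((dpA ind scc (fuel+1) u st).1.1.count false ≤ st.1.count false) := by
      intro u st
      simp only [dpA]
      exact le_trans (ih.2 _ _ _) (pvCountSetLe st.1 u)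
    refine ⟨hdfs, ?_⟩
    intro vs
    induction vs with
    | nil => intro st best; simp [dpAList]
    | cons v rest ihl =>
      intro st best
      by_cases h : PySem.List.pyGetD st.1 v true = true
      · simp only [dpAList, h, if_true]; exact ihl st _
      · simp only [dpAList, h, Bool.false_eq_true, if_false]
        exact le_trans (ihl _ _) (hdfs v st)

theorem pvDpAIrrel (ind scc : List (List Int)) : ∀ f1 f2 : Nat,
    (∀ u st, st.1.count false ≤ f1 → st.1.count false ≤ f2 →
        PySem.List.pyGetD st.1 u true = false → dpA ind scc f1 u st = dpA ind scc f2 u st) ∧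
    (∀ vs st best, st.1.count false ≤ f1 → st.1.count false ≤ f2 →
        dpAList ind scc f1 vs st best = dpAList ind scc f2 vs st best) := by
  intro f1
  induction f1 using Nat.strong_induction_on with
  | _ f1 ih =>
    intro f2
    have hdfs : ∀ u st, st.1.count false ≤ f1 → st.1.count false ≤ f2 →
        PySem.List.pyGetD st.1 u true = false → dpA ind scc f1 u st = dpA ind scc f2 u st := by
      intro u st h1 h2 hu
      have hpos : 0 < st.1.count false := pvCountPos hu
      obtain ⟨k1, rfl⟩ : ∃ k, f1 = k + 1 := ⟨f1 - 1, by omega⟩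
      obtain ⟨k2, rfl⟩ : ∃ k, f2 = k + 1 := ⟨f2 - 1, by omega⟩
      have hlt := pvCountSetLt hu
      simp only [dpA]
      rw [(ih k1 (by omega) k2).2 _ _ _ (by simpa using by omega) (by simpa using by omega)]
    refine ⟨hdfs, ?_⟩
    intro vs
    induction vs with
    | nil => intro st best h1 h2; simp [dpAList]
    | cons v rest ihl =>
      intro st best h1 h2
      by_cases hv : PySem.List.pyGetD st.1 v true = true
      · simp only [dpAList, hv, if_true]
        exact ihl st _ h1 h2
      · have hvf : PySem.List.pyGetD st.1 v true = false := by simpa using hv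
        simp only [dpAList, hvf, Bool.false_eq_true, if_false]
        rw [hdfs v st h1 h2 hvf,
          ihl _ _ (le_trans ((pvDpAMono ind scc f2).1 v st) h1)
            (le_trans ((pvDpAMono ind scc f2).1 v st) h2)]

-- ===== simulation: explicit-stack DP = recursive DP =====
def finishD (ind scc : List (List Int)) (F : Nat) (u i best : Int)
    (st : List Bool × List Int) : (List Bool × List Int) × Int :=
  let r := dpAList ind scc F ((PySem.List.pyGetD ind u []).drop i.toNat) st best
  let val := r.2 + ((PySem.List.pyGetD scc u []).length : Int)
  let bps := PySem.List.pySetD r.1.2 u val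
  ((r.1.1, bps), PySem.List.pyGetD bps u 0)

def retD (ind scc : List (List Int)) (F : Nat) :
    Int → List (Int × Int × Int) → List Bool × List Int → List Bool × List Int
  | _, [], st => st
  | v, (u, i, b) :: stk, st =>
      let r := finishD ind scc F u i (max b v) st
      retD ind scc F r.2 stk r.1

theorem pvSimD (ind scc : List (List Int)) (F : Nat) :
    ∀ frames st,
      (∀ f ∈ frames, 0 ≤ f.2.1) → st.1.count false ≤ F →
      dpMachine ind scc frames st =
        (match frames with
          | [] => st
          | (u, i, b) :: stk =>
              (fun (r : (List Bool × List Int) × Int) => retD ind scc F r.2 stk r.1)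
                (finishD ind scc F u i b st)) := by
  intro frames st
  fun_induction dpMachine ind scc frames st with
  | case1 st => intro _ _; rfl
  | case2 u i best stk st row hlt v hvis ih =>
    intro hf hc
    have h0 : 0 ≤ i := hf (u, i, best) (by simp)
    have hlt' : i < ((PySem.List.pyGetD ind u []).length : Int) := hlt
    have hvis' : PySem.List.pyGetD st.1
        (PySem.List.pyGetD (PySem.List.pyGetD ind u []) i 0) true = true := hvis
    have hiN : i.toNat < (PySem.List.pyGetD ind u []).length := by omega
    have hdrop : (PySem.List.pyGetD ind u []).drop i.toNat
        = PySem.List.pyGetD (PySem.List.pyGetD ind u []) i 0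
            :: (PySem.List.pyGetD ind u []).drop (i+1).toNat := by
      rw [List.drop_eq_getElem_cons hiN]
      congr 1
      · exact (PySem.List.pyGetD_eq_getElem _ _ h0 hlt').symm
      · congr 1; omega
    rw [ih (by
        intro f hfm
        rcases List.mem_cons.mp hfm with h | h
        · subst h; simpa using by omega
        · exact hf f (List.mem_cons_of_mem _ h)) hc]
    have key : finishD ind scc F u i best st
        = finishD ind scc F u (i+1)
            (max best (PySem.List.pyGetD st.2
              (PySem.List.pyGetD (PySem.List.pyGetD ind u []) i 0) 0)) st := by
      unfold finishD
      rw [hdrop]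
      simp only [dpAList, hvis', if_true]
    exact congrArg (fun (r : (List Bool × List Int) × Int) =>
      retD ind scc F r.2 stk r.1) key.symm
  | case3 u i best stk st row hlt v hvis ih =>
    intro hf hc
    have h0 : 0 ≤ i := hf (u, i, best) (by simp)
    have hlt' : i < ((PySem.List.pyGetD ind u []).length : Int) := hlt
    have hvf : PySem.List.pyGetD st.1
        (PySem.List.pyGetD (PySem.List.pyGetD ind u []) i 0) true = false := by simpa using hvis
    have hiN : i.toNat < (PySem.List.pyGetD ind u []).length := by omega
    have hdrop : (PySem.List.pyGetD ind u []).drop i.toNat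
        = PySem.List.pyGetD (PySem.List.pyGetD ind u []) i 0
            :: (PySem.List.pyGetD ind u []).drop (i+1).toNat := by
      rw [List.drop_eq_getElem_cons hiN]
      congr 1
      · exact (PySem.List.pyGetD_eq_getElem _ _ h0 hlt').symm
      · congr 1; omega
    have hcpos := pvCountPos hvf
    have hset := pvCountSetLt hvf
    rw [ih (by
        intro f hfm
        rcases List.mem_cons.mp hfm with h | h
        · subst h; simp
        · rcases List.mem_cons.mp h with h' | h'
          · subst h'; simpa using by omega
          · exact hf f (List.mem_cons_of_mem _ h')) (le_trans (le_of_lt hset) hc)]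
    obtain ⟨F', rfl⟩ : ∃ k, F = k + 1 := ⟨F - 1, by omega⟩
    have hrr : dpA ind scc (F'+1)
          (PySem.List.pyGetD (PySem.List.pyGetD ind u []) i 0) st
        = finishD ind scc (F'+1) (PySem.List.pyGetD (PySem.List.pyGetD ind u []) i 0) 0 0
            (PySem.List.pySetD st.1 (PySem.List.pyGetD (PySem.List.pyGetD ind u []) i 0) true,
              st.2) := by
      simp only [dpA, finishD, Int.toNat_zero, List.drop_zero]
      rw [(pvDpAIrrel ind scc F' (F'+1)).2 _ _ _
        (show (PySem.List.pySetD st.1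
            (PySem.List.pyGetD (PySem.List.pyGetD ind u []) i 0) true).count false ≤ F'
          from by omega)
        (show (PySem.List.pySetD st.1
            (PySem.List.pyGetD (PySem.List.pyGetD ind u []) i 0) true).count false ≤ F' + 1
          from by omega)]
    have key : finishD ind scc (F'+1) u i best st
        = (fun (r : (List Bool × List Int) × Int) =>
            finishD ind scc (F'+1) u (i+1) (max best r.2) r.1)
          (finishD ind scc (F'+1) (PySem.List.pyGetD (PySem.List.pyGetD ind u []) i 0) 0 0
            (PySem.List.pySetD st.1 (PySem.List.pyGetD (PySem.List.pyGetD ind u []) i 0) true,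
              st.2)) := by
      rw [← hrr]
      conv_lhs => unfold finishD
      rw [hdrop]
      simp only [dpAList, hvf, Bool.false_eq_true, if_false]
      rfl
    exact (congrArg (fun (r : (List Bool × List Int) × Int) =>
      retD ind scc (F'+1) r.2 stk r.1) key).symm
  | case4 u i best st row hge val bps =>
    intro hf hc
    have h0 : 0 ≤ i := hf (u, i, best) (by simp)
    have hge' : ¬ i < ((PySem.List.pyGetD ind u []).length : Int) := hge
    have hdrop : (PySem.List.pyGetD ind u []).drop i.toNat = [] :=
      List.drop_eq_nil_of_le (by omega)
    have key : finishD ind scc F u i best st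
        = ((st.1, PySem.List.pySetD st.2 u
              (best + ((PySem.List.pyGetD scc u []).length : Int))),
            PySem.List.pyGetD (PySem.List.pySetD st.2 u
              (best + ((PySem.List.pyGetD scc u []).length : Int))) u 0) := by
      unfold finishD
      rw [hdrop]
      simp only [dpAList]
    exact (congrArg Prod.fst key).symm
  | case5 u i best st row hge val bps pu pi pb rest ih =>
    intro hf hc
    have h0 : 0 ≤ i := hf (u, i, best) (by simp)
    have hge' : ¬ i < ((PySem.List.pyGetD ind u []).length : Int) := hge
    have hdrop : (PySem.List.pyGetD ind u []).drop i.toNat = [] :=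
      List.drop_eq_nil_of_le (by omega)
    have key : finishD ind scc F u i best st
        = ((st.1, PySem.List.pySetD st.2 u
              (best + ((PySem.List.pyGetD scc u []).length : Int))),
            PySem.List.pyGetD (PySem.List.pySetD st.2 u
              (best + ((PySem.List.pyGetD scc u []).length : Int))) u 0) := by
      unfold finishD
      rw [hdrop]
      simp only [dpAList]
    rw [ih (by
        intro f hfm
        rcases List.mem_cons.mp hfm with h | h
        · subst h; simpa using hf (pu, pi, pb) (by simp)
        · exact hf f (by simp [h])) hc]
    exact (congrArg (fun (r : (List Bool × List Int) × Int) =>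
      retD ind scc F r.2 ((pu, pi, pb) :: rest) r.1) key).symm

theorem pvBodyD (ind scc : List (List Int)) (C : Nat) {st : List Bool × List Int} {u : Int}
    (hlen : st.1.length = C) (hu : PySem.List.pyGetD st.1 u true = false) :
    dpMachine ind scc [(u, 0, 0)] (PySem.List.pySetD st.1 u true, st.2)
      = (dpA ind scc C u st).1 := by
  have hpos := pvCountPos hu
  have hle : st.1.count false ≤ C := hlen ▸ List.count_le_length
  obtain ⟨C', rfl⟩ : ∃ k, C = k + 1 := ⟨C - 1, by omega⟩
  rw [pvSimD ind scc C' [(u, 0, 0)] _ (by simp)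
    (show (PySem.List.pySetD st.1 u true).count false ≤ C'
      from by have := pvCountSetLt hu; omega)]
  simp only [dpA, finishD, retD, Int.toNat_zero, List.drop_zero]

theorem pvFoldD (ind scc : List (List Int)) (C : Nat) (l : List Int) :
    ∀ (st : List Bool × List Int), st.1.length = C →
      l.foldl (fun (st : List Bool × List Int) u =>
          if PySem.List.pyGetD st.1 u true then st else (dpA ind scc C u st).1) st
      = l.foldl (fun (st : List Bool × List Int) u =>
          if PySem.List.pyGetD st.1 u true then st
          else dpMachine ind scc [(u, 0, 0)] (PySem.List.pySetD st.1 u true, st.2)) st := by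
  intro st hlen
  induction l generalizing st with
  | nil => rfl
  | cons x xs ih =>
    simp only [List.foldl_cons]
    by_cases hx : PySem.List.pyGetD st.1 x true = true
    · simp only [hx, if_true]; exact ih st hlen
    · have hxf : PySem.List.pyGetD st.1 x true = false := by simpa using hx
      simp only [hxf, Bool.false_eq_true, if_false]
      rw [pvBodyD ind scc C hlen hxf]
      exact ih _ (by rw [(pvDpALen ind scc C).1]; exact hlen)

theorem pvFill (f : Int → Int) : ∀ (N : Nat) (suffix : List Int),
    (PySem.List.pyRange 0 (N : Int) 1).foldl
        (fun res u => PySem.List.pySetD res u (f u)) (List.replicate N 0 ++ suffix)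
      = (PySem.List.pyRange 0 (N : Int) 1).map f ++ suffix := by
  intro N
  induction N with
  | zero => intro suffix; simp
  | succ N ih =>
    intro suffix
    have hcast : ((N + 1 : Nat) : Int) = (N : Int) + 1 := by push_cast; ring
    rw [hcast, PySem.List.pyRange_one_succ_right (by positivity), List.foldl_append,
      List.map_append]
    have hrep : List.replicate (N + 1) (0 : Int) ++ suffix
        = List.replicate N 0 ++ ((0 : Int) :: suffix) := by
      rw [List.replicate_succ', List.append_assoc]; rfl
    rw [hrep, ih (0 :: suffix)]
    simp only [List.foldl_cons, List.foldl_nil, List.map_cons, List.map_nil]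
    have hlen : ((PySem.List.pyRange 0 (N : Int) 1).map f).length = N := by
      simp [PySem.List.length_pyRange_one]
    rw [PySem.List.pySetD_natCast]
    rw [List.set_append, if_neg (by omega)]
    rw [hlen]
    simp

theorem pvMainEq (graph : List (List Int)) :
    maximum_reachable_node graph = maximum_reachable_node_alt graph := by
  simp only [maximum_reachable_node, maximum_reachable_node_alt, pvSCC_A]
  rw [pvFold1 graph graph.length _ (List.replicate graph.length false) [] (by simp)]
  rw [pvFold2 (pvRevGraph graph) graph.length _ (List.replicate graph.length false) [] (by simp)]
  rw [pvFoldD _ _ _ _ _ (by simp)]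
  set scc := (((PySem.List.slice? ((PySem.List.pyRange 0 (graph.length : Int) 1).foldl
      (fun (st : List Bool × List Int) u =>
        if PySem.List.pyGetD st.1 u true then st
        else pvDfsIter graph u st.1 st.2)
      (List.replicate graph.length false, [])).2 none none (-1)).getD []).foldl
      (fun (st : List Bool × List (List Int)) u =>
        if PySem.List.pyGetD st.1 u true then st
        else
          let r := pvDfsIter (pvRevGraph graph) u st.1 []
          (r.1, st.2 ++ [r.2]))
      (List.replicate graph.length false, [])).2 with hscc
  rw [show (List.replicate graph.length (0:Int))
      = List.replicate graph.length (0:Int) ++ [] from (List.append_nil _).symm]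
  rw [pvFill]
  simp

-- ===== VERDICT (by name: the statement is the Claim_ definition above) =====
theorem maximum_reachable_node_spec : Claim_equal_maximum_reachable_node := by
  intro graph _ _
  unfold Spec_maximum_reachable_node
  exact pvMainEq graph
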